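-- pv_equiv track=rewrite | github.com/srinadhkesineni/leetcode | Make the array beautiful - GFG/make-the-array-beautiful.py | makeBeautiful
-- ===== SOURCE A (Python) =====
-- from typing import List
--
-- def makeBeautiful(arr: List[int]) -> List[int]:
--     stack = []
--     for num in arr:
--         if not stack or (stack[-1] < 0 and num < 0) or (stack[-1] >= 0 and num >= 0):
--             stack.append(num)
--         else:
--             stack.pop()
--     return stack
-- ===== SOURCE B (Python) =====
-- from typing import List
--
-- def makeBeautiful(arr: List[int]) -> List[int]:
--     # Fixed-point reduction: repeatedly delete the leftmost adjacent
--     # opposite-sign pair (0 counts as non-negative) until none remains.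
--     res = list(arr)
--     while True:
--         found = -1
--         for i in range(len(res) - 1):
--             if (res[i] < 0) != (res[i + 1] < 0):
--                 found = i
--                 break
--         if found < 0:
--             return res
--         del res[found:found + 2]
-- ===== Notes on version B (the rewrite author's own statement) =====
-- stated objective: alternative
-- what changed: Replaces the single-pass stack (push on same sign, pop on opposite) by a fixed-point rewriting loop that repeatedly deletes the leftmost adjacent opposite-sign pair until none remains.
import Mathlib
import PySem

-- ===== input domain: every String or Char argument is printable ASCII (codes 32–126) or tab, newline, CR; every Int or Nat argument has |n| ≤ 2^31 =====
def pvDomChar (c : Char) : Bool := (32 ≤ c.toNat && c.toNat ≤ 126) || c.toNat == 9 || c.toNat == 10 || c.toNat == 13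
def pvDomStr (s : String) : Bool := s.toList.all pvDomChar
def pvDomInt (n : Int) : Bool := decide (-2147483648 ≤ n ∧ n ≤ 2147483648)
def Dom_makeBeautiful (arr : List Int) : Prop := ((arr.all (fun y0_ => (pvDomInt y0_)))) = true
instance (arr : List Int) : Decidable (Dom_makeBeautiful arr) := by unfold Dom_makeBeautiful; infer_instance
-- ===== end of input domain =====

-- B is an alternative algorithm (fixed-point leftmost-pair deletion) of similar cost, not faster.

-- ===== PORT A =====
-- stack kept head-as-top (Python appends/pops at the end); reversed at return.
def makeBeautiful (arr : List Int) : List Int :=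
  (arr.foldl (fun stack num =>
    match stack with
    | [] => [num]
    | top :: rest =>
      if (top < 0 && num < 0) || (top ≥ 0 && num ≥ 0) then num :: top :: rest else rest) []).reverse

-- ===== PORT B =====
-- one scan of B's inner for-loop: delete the leftmost adjacent opposite-sign pair, if any
def pvStepB : List Int → Option (List Int)
  | [] => none
  | [_] => none
  | x :: y :: rest =>
    if decide (x < 0) != decide (y < 0) then some rest
    else (pvStepB (y :: rest)).map (fun s => x :: s)

theorem pvStepB_length : ∀ (l l' : List Int), pvStepB l = some l' → l'.length + 2 = l.length := by
  intro l
  induction l with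
  | nil => intro l' h; simp [pvStepB] at h
  | cons x t ih =>
    intro l' h
    match t, h with
    | [], h => simp [pvStepB] at h
    | y :: rest, h =>
      simp only [pvStepB] at h
      split at h
      · injection h with h; subst h; simp
      · rcases Option.map_eq_some_iff.mp h with ⟨s, hs, rfl⟩
        have := ih s hs
        simp only [List.length_cons] at *
        omega

-- B's outer while-loop: iterate the deletion to a fixed point
def makeBeautiful_alt (arr : List Int) : List Int :=
  match h : pvStepB arr with
  | none => arr
  | some arr' => makeBeautiful_alt arr'
termination_by arr.length
decreasing_by have := pvStepB_length arr arr' h; omega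

-- ===== PRECONDITION & SPEC =====
def Spec_makeBeautiful (arr : List Int) (out : List Int) : Prop := out = makeBeautiful_alt arr
instance (arr : List Int) (out : List Int) : Decidable (Spec_makeBeautiful arr out) := by unfold Spec_makeBeautiful; infer_instance

-- ===== CLAIM (what is proved, stated in full; the proofs are below) =====
def Claim_equal_makeBeautiful : Prop := ∀ (arr : List Int), Dom_makeBeautiful arr → Spec_makeBeautiful arr (makeBeautiful arr)

-- ===== LEMMAS AND PROOFS =====

def pvF : List Int → Int → List Int := fun stack num =>
    match stack with
    | [] => [num]
    | top :: rest =>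
      if (top < 0 && num < 0) || (top ≥ 0 && num ≥ 0) then num :: top :: rest else rest

-- "the fold pushes the next element": stack empty or its top has the same sign as l's head
def pvOk (stack l : List Int) : Prop :=
  match stack, l with
  | t :: _, h :: _ => ((t < 0 && h < 0) || (t ≥ 0 && h ≥ 0)) = true
  | _, _ => True

theorem pvPush (stack : List Int) (x : Int) (l : List Int) (h : pvOk stack (x :: l)) :
    (x :: l).foldl pvF stack = l.foldl pvF (x :: stack) := by
  cases stack with
  | nil => simp [pvF]
  | cons t r => simp only [pvOk] at h; simp [pvF, h]

theorem pvOpp {x y : Int} (h : (decide (x < 0) != decide (y < 0)) = true) :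
    ((x < 0 && y < 0) || (x ≥ 0 && y ≥ 0)) = false := by
  by_cases hx : x < 0 <;> by_cases hy : y < 0 <;> simp_all

theorem pvSame {x y : Int} (h : ¬ (decide (x < 0) != decide (y < 0)) = true) :
    ((x < 0 && y < 0) || (x ≥ 0 && y ≥ 0)) = true := by
  by_cases hx : x < 0 <;> by_cases hy : y < 0 <;> simp_all

-- one deletion step does not change A's fold result
theorem pvStep_fold : ∀ (l l' stack : List Int), pvStepB l = some l' → pvOk stack l →
    l.foldl pvF stack = l'.foldl pvF stack := by
  intro l
  induction l with
  | nil => intro l' stack h; simp [pvStepB] at h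
  | cons x t ih =>
    intro l' stack h hok
    match t, h with
    | [], h => simp [pvStepB] at h
    | y :: rest, h =>
      simp only [pvStepB] at h
      rw [pvPush stack x (y :: rest) hok]
      split at h
      · -- opposite pair x,y cancelled: push x then pop it
        rename_i hxy
        injection h with h; subst h
        simp [List.foldl, pvF, pvOpp hxy]
      · rename_i hxy
        rcases Option.map_eq_some_iff.mp h with ⟨s, hs, rfl⟩
        have hok' : pvOk (x :: stack) (y :: rest) := by simp [pvOk, pvSame hxy]
        rw [ih s (x :: stack) hs hok']
        -- and fold of x :: s from stack also pushes x first
        have hok2 : pvOk stack (x :: s) := by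
          cases stack with
          | nil => trivial
          | cons t r => simpa [pvOk] using hok
        rw [pvPush stack x s hok2]

-- no deletion step possible ⇒ the fold pushes everything
theorem pvStep_none : ∀ (l stack : List Int), pvStepB l = none → pvOk stack l →
    l.foldl pvF stack = l.reverse ++ stack := by
  intro l
  induction l with
  | nil => intro stack _ _; simp
  | cons x t ih =>
    intro stack h hok
    rw [pvPush stack x t hok]
    match t, h with
    | [], h => simp
    | y :: rest, h =>
      simp only [pvStepB] at h
      split at h
      · exact absurd h (by simp)
      · rename_i hxy
        have hs : pvStepB (y :: rest) = none := by
          cases hcase : pvStepB (y :: rest) with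
          | none => rfl
          | some s => rw [hcase] at h; simp at h
        have hok' : pvOk (x :: stack) (y :: rest) := by simp [pvOk, pvSame hxy]
        rw [ih (x :: stack) hs hok']
        simp

theorem pvMain : ∀ (n : ℕ) (l : List Int), l.length ≤ n → makeBeautiful l = makeBeautiful_alt l := by
  intro n
  induction n with
  | zero =>
    intro l hl
    have : l = [] := List.eq_nil_of_length_eq_zero (Nat.le_zero.mp hl)
    subst this
    rw [makeBeautiful_alt]
    simp [pvStepB, makeBeautiful]
  | succ n ih =>
    intro l hl
    rw [makeBeautiful_alt]
    cases hstep : pvStepB l with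
    | none =>
      show (l.foldl pvF []).reverse = l
      rw [pvStep_none l [] hstep trivial]; simp
    | some l' =>
      have hlen := pvStepB_length l l' hstep
      have h1 : makeBeautiful l = makeBeautiful l' := by
        show (l.foldl pvF []).reverse = (l'.foldl pvF []).reverse
        rw [pvStep_fold l l' [] hstep trivial]
      rw [h1]
      exact ih l' (by omega)

-- ===== VERDICT (by name: the statement is the Claim_ definition above) =====
theorem makeBeautiful_spec : Claim_equal_makeBeautiful := by
  intro arr _
  show makeBeautiful arr = makeBeautiful_alt arr
  exact pvMain arr.length arr le_rfl
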